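-- pv_equiv track=rewrite | github.com/Darlene-13/java-python-backend-lab | python/fibonacci.py | fibonnaci_seq
-- ===== SOURCE A (Python) =====
-- def fibonnaci_seq(limit):
--     prev_num = 0
--     curr_num = 1
--     flist = [prev_num]
--     even_sum = 0
--
--     while (curr_num <= limit):
--         flist.append(curr_num)
--
--
--         if curr_num % 2 == 0:
--             even_sum += curr_num
--
--         next_num = curr_num + prev_num
--         prev_num = curr_num
--         curr_num = next_num
--     return flist, even_sum
-- ===== SOURCE B (Python) =====
-- def fibonnaci_seq(limit):
--     # Fibonacci parity has period 3: odd, odd, even. Generate a whole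
--     # (odd a, odd b, even a+b) triple per iteration; the even sum is the
--     # sum of the third elements, no modulo test needed.
--     flist = [0]
--     even_sum = 0
--     a, b = 1, 1
--     while a <= limit:
--         flist.append(a)
--         if b > limit:
--             break
--         flist.append(b)
--         c = a + b
--         if c > limit:
--             break
--         flist.append(c)
--         even_sum += c
--         a, b = b + c, b + 2 * c
--     return flist, even_sum
-- ===== Notes on version B (the rewrite author's own statement) =====
-- stated objective: alternative
-- what changed: Instead of stepping one Fibonacci term at a time and testing each term's parity with a modulo, B exploits the fact that Fibonacci parity repeats as odd-odd-even: it generates a whole such triple per loop iteration via a jump recurrence on the two leading odd terms, and adds only the guaranteed-even third term to the sum, with no parity test at all.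
import Mathlib
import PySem

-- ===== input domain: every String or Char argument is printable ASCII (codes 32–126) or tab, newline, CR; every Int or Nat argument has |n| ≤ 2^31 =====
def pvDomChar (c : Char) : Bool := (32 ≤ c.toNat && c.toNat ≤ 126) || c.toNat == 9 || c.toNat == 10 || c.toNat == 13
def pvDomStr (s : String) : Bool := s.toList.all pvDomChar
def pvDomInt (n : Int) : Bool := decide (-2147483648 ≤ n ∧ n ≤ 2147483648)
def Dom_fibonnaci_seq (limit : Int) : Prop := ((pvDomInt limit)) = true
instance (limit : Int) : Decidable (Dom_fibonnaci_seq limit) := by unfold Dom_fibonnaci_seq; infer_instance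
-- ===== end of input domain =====

-- B replaces A's one-term-per-step loop with a stride-3 loop over Fibonacci parity
-- triples (odd, odd, even), adding only the guaranteed-even third term — no modulo test.
-- Fuel is a pure totality guard: 99 (resp. 33) exceeds the iteration count for every
-- |limit| ≤ 2^31, and both ports return the accumulated state identically when it runs out.

-- ===== PORT A =====
def fibLoopA : Nat → Int → Int → Int → List Int → Int → List Int × Int
  | 0, _, _, _, flist, even_sum => (flist, even_sum)
  | fuel + 1, limit, prev, curr, flist, even_sum =>
    if curr ≤ limit then
      fibLoopA fuel limit curr (curr + prev) (flist ++ [curr])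
        (if curr % 2 = 0 then even_sum + curr else even_sum)
    else (flist, even_sum)

def fibonnaci_seq (limit : Int) : List Int × Int :=
  fibLoopA 99 limit 0 1 [0] 0

-- ===== PORT B =====
def fibLoopB : Nat → Int → Int → Int → List Int → Int → List Int × Int
  | 0, _, _, _, flist, even_sum => (flist, even_sum)
  | fuel + 1, limit, a, b, flist, even_sum =>
    if a ≤ limit then
      if b ≤ limit then
        if a + b ≤ limit then
          fibLoopB fuel limit (b + (a + b)) (b + 2 * (a + b))
            (flist ++ [a] ++ [b] ++ [a + b]) (even_sum + (a + b))
        else (flist ++ [a] ++ [b], even_sum)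
      else (flist ++ [a], even_sum)
    else (flist, even_sum)

def fibonnaci_seq_alt (limit : Int) : List Int × Int :=
  fibLoopB 33 limit 1 1 [0] 0

-- ===== PRECONDITION & SPEC =====
def Spec_fibonnaci_seq (limit : Int) (out : List Int × Int) : Prop := out = fibonnaci_seq_alt limit
instance (limit : Int) (out : List Int × Int) : Decidable (Spec_fibonnaci_seq limit out) := by unfold Spec_fibonnaci_seq; infer_instance

-- ===== CLAIM (what is proved, stated in full; the proofs are below) =====
def Claim_equal_fibonnaci_seq : Prop := ∀ (limit : Int), Dom_fibonnaci_seq limit → Spec_fibonnaci_seq limit (fibonnaci_seq limit)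

-- ===== LEMMAS AND PROOFS =====

-- Three steps of A's loop from an (odd curr, odd curr+prev) state equal one step of
-- B's triple loop; the parity invariant (both arguments odd) is preserved by the jump.
theorem fibLoop_triple (f : Nat) (limit : Int) :
    ∀ (p c : Int) (fl : List Int) (es : Int), c % 2 = 1 → (c + p) % 2 = 1 →
      fibLoopA (3 * f) limit p c fl es = fibLoopB f limit c (c + p) fl es := by
  induction f with
  | zero => intro p c fl es _ _; rfl
  | succ f ih =>
      intro p c fl es hc hcp
      have h3 : 3 * (f + 1) = (3 * f) + 1 + 1 + 1 := by ring
      rw [h3]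
      rw [fibLoopA, fibLoopB]
      by_cases h1 : c ≤ limit
      · rw [if_pos h1, if_pos h1]
        have hco : ¬ c % 2 = 0 := by omega
        rw [if_neg hco, fibLoopA]
        by_cases h2 : c + p ≤ limit
        · rw [if_pos h2, if_pos h2]
          have hcpo : ¬ (c + p) % 2 = 0 := by omega
          rw [if_neg hcpo, fibLoopA]
          by_cases h3' : (c + p) + c ≤ limit
          · have h3'' : c + (c + p) ≤ limit := by omega
            rw [if_pos h3', if_pos h3'']
            have heq : (c + p) + c = c + (c + p) := by ring
            have heven : ((c + p) + c) % 2 = 0 := by omega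
            rw [if_pos heven]
            have := ih ((c + p) + c) ((c + p) + ((c + p) + c)) (fl ++ [c] ++ [c + p] ++ [(c + p) + c]) (es + ((c + p) + c)) (by omega) (by omega)
            have e0 : c + (c + p) = c + p + c := by ring
            rw [e0]
            rw [show c + p + c + (c + p) = c + p + (c + p + c) from by ring,
                show c + p + 2 * (c + p + c) = c + p + (c + p + c) + (c + p + c) from by ring]
            exact this
          · have h3'' : ¬ c + (c + p) ≤ limit := by omega
            rw [if_neg h3', if_neg h3'']
        · rw [if_neg h2, if_neg h2]
      · rw [if_neg h1, if_neg h1]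

-- ===== VERDICT (by name: the statement is the Claim_ definition above) =====
theorem fibonnaci_seq_spec : Claim_equal_fibonnaci_seq := by
  intro limit _
  unfold Spec_fibonnaci_seq fibonnaci_seq fibonnaci_seq_alt
  have h : (99 : Nat) = 3 * 33 := by norm_num
  rw [h]
  have := fibLoop_triple 33 limit 0 1 [0] 0 (by decide) (by decide)
  simpa using this
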